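-- pv_equiv track=rewrite | github.com/Xiumin1714/Pystudy | 프로그래머스/1/42840. 모의고사/모의고사.py | solution
-- ===== SOURCE A (Python) =====
-- def solution(answers):
--     answer = []
--     scores = [0,0,0]
--     arr1 = [1,2,3,4,5]
--     arr2 = [2,1,2,3,2,4,2,5]
--     arr3 = [3,3,1,1,2,2,4,4,5,5]
--
--     for i in range(len(answers)):
--         if answers[i] == arr1[i%5]:
--             scores[0] += 1
--         if answers[i] == arr2[i%8]:
--             scores[1] += 1
--         if answers[i] == arr3[i%10]:
--             scores[2] += 1
--
--     for idx, num in enumerate(scores):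
--         if num == max(scores):
--             answer.append(idx+1)
--     return answer
-- ===== SOURCE B (Python) =====
-- def solution(answers):
--     # All three patterns repeat with period lcm(5,8,10) = 40, so one histogram
--     # of (position mod 40, answer) pairs determines every score: each pattern's
--     # score is a 40-term table lookup sum, with no per-pattern scan of answers.
--     hist = {}
--     for i, a in enumerate(answers):
--         key = (i % 40, a)
--         hist[key] = hist.get(key, 0) + 1
--     patterns = [[1, 2, 3, 4, 5],
--                 [2, 1, 2, 3, 2, 4, 2, 5],
--                 [3, 3, 1, 1, 2, 2, 4, 4, 5, 5]]
--     scores = [sum(hist.get((r, pat[r % len(pat)]), 0) for r in range(40))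
--               for pat in patterns]
--     best = max(scores)
--     return [i + 1 for i, s in enumerate(scores) if s == best]
-- ===== Notes on version B (the rewrite author's own statement) =====
-- stated objective: alternative
-- what changed: Instead of comparing each answer against each pattern, B builds a histogram of (index mod 40, answer) pairs in one pass (40 = lcm of the pattern periods) and computes every score as a fixed 40-term table-lookup sum; the winner list is a filter/map comprehension instead of an append loop.
import Mathlib
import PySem

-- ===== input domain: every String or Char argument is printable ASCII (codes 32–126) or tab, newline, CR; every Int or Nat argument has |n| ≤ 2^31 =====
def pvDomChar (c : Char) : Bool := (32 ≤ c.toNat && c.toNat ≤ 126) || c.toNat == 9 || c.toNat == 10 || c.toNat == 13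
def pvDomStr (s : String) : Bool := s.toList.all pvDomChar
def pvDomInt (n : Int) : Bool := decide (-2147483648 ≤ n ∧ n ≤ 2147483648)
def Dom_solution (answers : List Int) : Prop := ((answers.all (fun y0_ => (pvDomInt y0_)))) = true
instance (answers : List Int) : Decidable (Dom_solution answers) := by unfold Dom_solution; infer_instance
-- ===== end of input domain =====

-- B replaces A's per-pattern comparisons by a single histogram of (index mod 40, answer) pairs (40 = lcm of the pattern periods) plus a fixed 40-term lookup sum per pattern (alternative algorithm; same cost).


-- ===== PORT A =====
-- the loop indexes answers[i] and arrK[i % len(arrK)], both always in range, so pyGetD with default 0 is exact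
def solution (answers : List Int) : List Int :=
  let arr1 : List Int := [1,2,3,4,5]
  let arr2 : List Int := [2,1,2,3,2,4,2,5]
  let arr3 : List Int := [3,3,1,1,2,2,4,4,5,5]
  let scores : Int × Int × Int :=
    (PySem.List.pyRange 0 (answers.length : Int) 1).foldl
      (fun s i =>
        (if PySem.List.pyGetD answers i 0 == PySem.List.pyGetD arr1 (PySem.Int.mod i 5) 0 then s.1 + 1 else s.1,
         if PySem.List.pyGetD answers i 0 == PySem.List.pyGetD arr2 (PySem.Int.mod i 8) 0 then s.2.1 + 1 else s.2.1,
         if PySem.List.pyGetD answers i 0 == PySem.List.pyGetD arr3 (PySem.Int.mod i 10) 0 then s.2.2 + 1 else s.2.2))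
      (0, 0, 0)
  let scoresL : List Int := [scores.1, scores.2.1, scores.2.2]
  -- max(scores): scoresL always has 3 elements, so max? never returns none; getD 0 is exact
  (PySem.List.enumerate scoresL 0).foldl
    (fun acc p => if p.2 == (PySem.List.max? scoresL (fun x => x)).getD 0 then acc ++ [p.1 + 1] else acc) []

-- ===== PORT B =====
-- hist[key] = hist.get(key, 0) + 1 over enumerate(answers), key = (i % 40, a)
def pvHist (answers : List Int) : PySem.Dict (Int × Int) Int :=
  (PySem.List.enumerate answers 0).foldl
    (fun d p =>
      let key : Int × Int := (PySem.Int.mod p.1 40, p.2)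
      d.insert key (d.getD key 0 + 1))
    PySem.Dict.empty

-- sum(hist.get((r, pat[r % len(pat)]), 0) for r in range(40))
def pvScoreB (hist : PySem.Dict (Int × Int) Int) (pat : List Int) : Int :=
  (PySem.List.pyRange 0 40 1).foldl
    (fun s r => s + hist.getD (r, PySem.List.pyGetD pat (PySem.Int.mod r (pat.length : Int)) 0) 0) 0

def solution_alt (answers : List Int) : List Int :=
  let hist := pvHist answers
  let patterns : List (List Int) := [[1,2,3,4,5],[2,1,2,3,2,4,2,5],[3,3,1,1,2,2,4,4,5,5]]
  let scores : List Int := patterns.map (fun pat => pvScoreB hist pat)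
  -- max(scores): scores always has 3 elements, so max? never returns none; getD 0 is exact
  let best : Int := (PySem.List.max? scores (fun x => x)).getD 0
  ((PySem.List.enumerate scores 0).filter (fun p => p.2 == best)).map (fun p => p.1 + 1)

-- ===== PRECONDITION & SPEC =====
def Spec_solution (answers : List Int) (out : List Int) : Prop := out = solution_alt answers
instance (answers : List Int) (out : List Int) : Decidable (Spec_solution answers out) := by unfold Spec_solution; infer_instance

-- ===== CLAIM =====
def Claim_equal_solution : Prop := ∀ (answers : List Int), Dom_solution answers → Spec_solution answers (solution answers)

-- ===== LEMMAS AND PROOFS =====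

-- a loop with three independent accumulators is three loops
theorem pv_foldl_triple {α : Type} (f g h : Int → α → Int) :
    ∀ (l : List α) (a b c : Int),
      l.foldl (fun s x => (f s.1 x, g s.2.1 x, h s.2.2 x)) (a, b, c)
        = (l.foldl f a, l.foldl g b, l.foldl h c) := by
  intro l
  induction l with
  | nil => intro a b c; rfl
  | cons x t ih => intro a b c; simpa using ih (f a x) (g b x) (h c x)

-- count-if fold as countP
theorem pv_foldl_count {α : Type} (p : α → Bool) :
    ∀ (l : List α) (s : Int),
      l.foldl (fun s x => if p x then s + 1 else s) s = s + (l.countP p : Int) := by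
  intro l
  induction l with
  | nil => intro s; simp
  | cons x t ih =>
      intro s
      by_cases hx : p x = true
      · simp [hx, ih]; ring
      · simp [hx, ih]

-- one component of A's loop, in Python-int form, as a countP over indices
theorem pvA (answers pat : List Int) (d : Int)
    (hd : d = (pat.length : Int)) :
    (List.range answers.length).foldl
        (fun (s : Int) (k : Nat) =>
          if PySem.List.pyGetD answers (k : Int) 0 ==
              PySem.List.pyGetD pat (PySem.Int.mod (k : Int) d) 0 then s + 1 else s) 0
      = ((List.range answers.length).countP
          (fun k => answers.getD k 0 == pat.getD (k % pat.length) 0) : Int) := by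
  subst hd
  rw [pv_foldl_count, zero_add]
  congr 1
  apply List.countP_congr
  intro k _
  rw [PySem.Int.mod_natCast k pat.length]
  simp only [PySem.List.pyGetD_natCast, List.getD]

-- sum over range N of the indicator of j, j out of range
theorem pv_ind_zero (j : Nat) :
    ∀ N, N ≤ j → ((List.range N).map (fun r => if j = r then (1:Int) else 0)).sum = 0 := by
  intro N
  induction N with
  | zero => intro _; simp
  | succ N ih =>
      intro hj
      rw [List.range_succ, List.map_append, List.sum_append, ih (by omega)]
      have : j ≠ N := by omega
      simp [this]

-- sum over range N of the indicator of j, j in range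
theorem pv_ind_one (j : Nat) :
    ∀ N, j < N → ((List.range N).map (fun r => if j = r then (1:Int) else 0)).sum = 1 := by
  intro N
  induction N with
  | zero => intro h; omega
  | succ N ih =>
      intro hj
      rw [List.range_succ, List.map_append, List.sum_append]
      by_cases hjN : j = N
      · rw [hjN, pv_ind_zero N N (le_refl N)]; simp
      · rw [ih (by omega)]; simp [hjN]

theorem pv_sum_map_add (l : List Nat) (f g : Nat → Int) :
    (l.map (fun x => f x + g x)).sum = (l.map f).sum + (l.map g).sum := by
  induction l with
  | nil => simp
  | cons x t ih => simp [ih]; ring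

-- splitting a count over indices by the residue class of the index
theorem pv_sum_split (N : Nat) (hN : 0 < N) (v w : Nat → Int) :
    ∀ n : Nat,
      ((List.range N).map
          (fun r => ((List.range n).countP (fun k => (k % N == r) && (w k == v r)) : Int))).sum
        = ((List.range n).countP (fun k => w k == v (k % N)) : Int) := by
  intro n
  induction n with
  | zero => simp
  | succ n ih =>
      have hsplit : ∀ (p : Nat → Bool),
          ((List.range (n+1)).countP p : Int)
            = ((List.range n).countP p : Int) + (if p n then 1 else 0) := by
        intro p
        rw [List.range_succ, List.countP_append]
        push_cast
        simp [List.countP_cons]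
      calc ((List.range N).map
              (fun r => ((List.range (n+1)).countP (fun k => (k % N == r) && (w k == v r)) : Int))).sum
          = ((List.range N).map
              (fun r => ((List.range n).countP (fun k => (k % N == r) && (w k == v r)) : Int)
                + (if (n % N == r) && (w n == v r) then 1 else 0))).sum := by
            apply congrArg
            apply List.map_congr_left
            intro r _
            exact hsplit _
        _ = ((List.range N).map
              (fun r => ((List.range n).countP (fun k => (k % N == r) && (w k == v r)) : Int))).sum
            + ((List.range N).map
              (fun r => (if (n % N == r) && (w n == v r) then (1:Int) else 0))).sum := by
            exact pv_sum_map_add _ _ _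
        _ = ((List.range n).countP (fun k => w k == v (k % N)) : Int)
            + (if w n == v (n % N) then 1 else 0) := by
            rw [ih]
            congr 1
            by_cases hb : (w n == v (n % N)) = true
            · have hmap : ∀ r, (if (n % N == r) && (w n == v r) then (1:Int) else 0)
                  = (if n % N = r then (1:Int) else 0) := by
                intro r
                by_cases hr : n % N = r
                · subst hr; simp [hb]
                · simp [hr]
              rw [List.map_congr_left (fun r _ => hmap r),
                  pv_ind_one (n % N) N (Nat.mod_lt n hN), hb]
              simp
            · have hb' : (w n == v (n % N)) = false := by
                cases hc : (w n == v (n % N)) with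
                | true => exact absurd hc hb
                | false => rfl
              have hmap : ∀ r, r ∈ List.range N →
                  (if (n % N == r) && (w n == v r) then (1:Int) else 0) = 0 := by
                intro r _
                by_cases hr : n % N = r
                · subst hr; simp [hb']
                · simp [hr]
              rw [List.map_congr_left hmap, hb']
              simp
        _ = ((List.range (n+1)).countP (fun k => w k == v (k % N)) : Int) := by
            rw [hsplit]

-- getD of the histogram fold counts the matching keys
theorem pv_fold_insert_count {kappa : Type} [BEq kappa] [LawfulBEq kappa] (f : Nat → kappa) :
    ∀ (l : List Nat) (d : PySem.Dict kappa Int) (v : kappa),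
      (l.foldl (fun d k => d.insert (f k) (d.getD (f k) 0 + 1)) d).getD v 0
        = d.getD v 0 + (l.countP (fun k => f k == v) : Int) := by
  intro l
  induction l with
  | nil => intro d v; simp
  | cons x t ih =>
      intro d v
      rw [List.foldl_cons, ih, List.countP_cons]
      by_cases h : f x = v
      · subst h
        rw [PySem.Dict.getD_insert_self]
        push_cast
        simp
        ring
      · rw [PySem.Dict.getD_insert_of_ne _ _ _ (Ne.symm h)]
        have : (f x == v) = false := by simp [h]
        simp [this]

-- B's table-lookup score equals the direct modular count
theorem pvB (answers pat : List Int) (hdvd : pat.length ∣ 40) :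
    pvScoreB (pvHist answers) pat
      = ((List.range answers.length).countP
          (fun k => answers.getD k 0 == pat.getD (k % pat.length) 0) : Int) := by
  have hmod40 : ∀ k : Nat, PySem.Int.mod (k : Int) 40 = ((k % 40 : Nat) : Int) := by
    intro k; exact_mod_cast PySem.Int.mod_natCast k 40
  -- the histogram's lookups, as counts over the index range
  have hhist : ∀ v : Int × Int,
      (pvHist answers).getD v 0
        = ((List.range answers.length).countP
            (fun k => ((((k % 40 : Nat) : Int), answers.getD k 0) == v)) : Int) := by
    intro v
    unfold pvHist
    rw [PySem.List.enumerate_eq_map_pyRange answers 0,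
        show PySem.List.len answers = ((answers.length : Nat) : Int) by simp [PySem.List.len],
        PySem.List.pyRange_zero_nat, List.map_map, List.foldl_map]
    rw [show (fun (d : PySem.Dict (Int × Int) Int) (k : Nat) =>
          (fun (d : PySem.Dict (Int × Int) Int) (p : Int × Int) =>
            let key : Int × Int := (PySem.Int.mod p.1 40, p.2)
            d.insert key (d.getD key 0 + 1)) d
            (((fun j => (j, PySem.List.pyGetD answers j 0)) ∘ (fun (k : Nat) => (k : Int))) k))
        = (fun (d : PySem.Dict (Int × Int) Int) (k : Nat) =>
            d.insert (PySem.Int.mod (k : Int) 40, PySem.List.pyGetD answers (k : Int) 0)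
              (d.getD (PySem.Int.mod (k : Int) 40, PySem.List.pyGetD answers (k : Int) 0) 0 + 1)) from rfl]
    rw [pv_fold_insert_count
          (fun k : Nat => (PySem.Int.mod (k : Int) 40, PySem.List.pyGetD answers (k : Int) 0)),
        PySem.Dict.getD_empty, zero_add]
    congr 1
    apply List.countP_congr
    intro k _
    rw [hmod40 k]
    simp only [PySem.List.pyGetD_natCast, List.getD]
  unfold pvScoreB
  rw [PySem.List.foldl_add, zero_add,
      show ((40 : Int)) = (((40 : Nat) : Int)) by norm_num,
      PySem.List.pyRange_zero_nat, List.map_map]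
  have hcastbeq : ∀ (x y : Nat), (((x : Int)) == ((y : Int))) = (x == y) := by
    intro x y; by_cases h : x = y <;> simp [h]
  have hmap : List.map
        ((fun r : Int =>
            (pvHist answers).getD (r, PySem.List.pyGetD pat (PySem.Int.mod r (pat.length : Int)) 0) 0)
          ∘ (fun (k : Nat) => (k : Int)))
        (List.range 40)
      = List.map (fun r : Nat =>
          (((List.range answers.length).countP
            (fun k => (k % 40 == r) && (answers.getD k 0 == pat.getD (r % pat.length) 0))) : Int))
        (List.range 40) := by
    apply List.map_congr_left
    intro r _
    simp only [Function.comp]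
    rw [hhist, PySem.Int.mod_natCast r pat.length]
    simp only [PySem.List.pyGetD_natCast, List.getD]
    have hpair : ∀ (x y : Nat) (u w : Int),
        ((((x : Nat) : Int), u) == (((y : Nat) : Int), w)) = ((x == y) && (u == w)) := by
      intro x y u w
      rw [show ((((x : Nat) : Int), u) == (((y : Nat) : Int), w))
            = ((((x : Nat) : Int) == ((y : Nat) : Int)) && (u == w)) from rfl, hcastbeq]
    congr 1
    apply List.countP_congr
    intro k _
    rw [hpair]
  rw [hmap,
      pv_sum_split 40 (by norm_num) (fun r => pat.getD (r % pat.length) 0) (fun k => answers.getD k 0)]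
  congr 1
  apply List.countP_congr
  intro k _
  rw [Nat.mod_mod_of_dvd k hdvd]


theorem solution_eq_alt (answers : List Int) : solution answers = solution_alt answers := by
  unfold solution solution_alt
  simp only []
  rw [PySem.List.pyRange_zero_nat, List.foldl_map]
  rw [pv_foldl_triple
    (f := fun (s : Int) (k : Nat) =>
      if PySem.List.pyGetD answers (k : Int) 0 ==
          PySem.List.pyGetD ([1,2,3,4,5] : List Int) (PySem.Int.mod (k : Int) 5) 0 then s + 1 else s)
    (g := fun (s : Int) (k : Nat) =>
      if PySem.List.pyGetD answers (k : Int) 0 ==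
          PySem.List.pyGetD ([2,1,2,3,2,4,2,5] : List Int) (PySem.Int.mod (k : Int) 8) 0 then s + 1 else s)
    (h := fun (s : Int) (k : Nat) =>
      if PySem.List.pyGetD answers (k : Int) 0 ==
          PySem.List.pyGetD ([3,3,1,1,2,2,4,4,5,5] : List Int) (PySem.Int.mod (k : Int) 10) 0 then s + 1 else s)]
  rw [pvA answers [1,2,3,4,5] 5 (by norm_num),
      pvA answers [2,1,2,3,2,4,2,5] 8 (by norm_num),
      pvA answers [3,3,1,1,2,2,4,4,5,5] 10 (by norm_num)]
  rw [← pvB answers [1,2,3,4,5] (by norm_num),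
      ← pvB answers [2,1,2,3,2,4,2,5] (by norm_num),
      ← pvB answers [3,3,1,1,2,2,4,4,5,5] (by norm_num)]
  rw [PySem.List.foldl_append_if]
  simp [List.map_cons]

-- ===== VERDICT =====
theorem solution_spec : Claim_equal_solution := by
  intro answers _
  unfold Spec_solution
  exact solution_eq_alt answers
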